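-- pv_equiv track=rewrite | github.com/mma323/DTE-2511 | oblig4/gift_wrapping.py | get_right_most_lowest_point
-- ===== SOURCE A (Python) =====
-- def get_right_most_lowest_point(points):
--     right_most_index = 0;
--     right_most_x = points[0][0];
--     right_most_y = points[0][1];
--
--     for i in range(1, len(points)):
--         if right_most_y > points[i][1]:
--             right_most_y = points[i][1]
--             right_most_x = points[i][0]
--             right_most_index = i
--         elif right_most_y == points[i][1] and right_most_x < points[i][0]:
--             right_most_x = points[i][0]
--             right_most_index = i
--
--     return points[right_most_index]
-- ===== SOURCE B (Python) =====
-- def get_right_most_lowest_point(points):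
--     lowest_y = min(p[1] for p in points)
--     return max((p for p in points if p[1] == lowest_y), key=lambda p: p[0])
-- ===== Notes on version B (the rewrite author's own statement) =====
-- stated objective: simpler
-- what changed: A's single fused scan that tracks an index and best (x,y) with a two-way branch is replaced by two plain passes: take the minimum of the y-coordinates, then the right-most point among those attaining it.
-- outside the precondition, e.g. on get_right_most_lowest_point([]): A raises IndexError, B raises ValueError
import Mathlib
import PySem

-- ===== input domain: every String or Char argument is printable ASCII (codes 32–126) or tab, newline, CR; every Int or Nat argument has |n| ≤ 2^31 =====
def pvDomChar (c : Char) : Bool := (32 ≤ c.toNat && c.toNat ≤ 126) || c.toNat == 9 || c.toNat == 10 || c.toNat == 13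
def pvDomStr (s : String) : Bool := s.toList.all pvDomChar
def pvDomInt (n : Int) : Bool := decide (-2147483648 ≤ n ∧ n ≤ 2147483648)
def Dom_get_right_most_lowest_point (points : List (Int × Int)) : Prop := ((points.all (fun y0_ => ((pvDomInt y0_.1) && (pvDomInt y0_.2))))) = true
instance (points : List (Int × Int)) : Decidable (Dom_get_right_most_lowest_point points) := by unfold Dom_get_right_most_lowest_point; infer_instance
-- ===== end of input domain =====

-- B replaces A's single fused index-tracking scan by two passes (min of the y's, then the
-- right-most point among those attaining it); objective: simpler, same O(n) cost.

-- ===== PORT A =====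
-- the loop body of A, acting on the state (right_most_index, right_most_x, right_most_y)
def pvAStep (points : List (Int × Int)) (s : Int × Int × Int) (i : Int) : Int × Int × Int :=
  let pi := PySem.List.pyGetD points i (0, 0)
  if s.2.2 > pi.2 then (i, pi.1, pi.2)
  else if s.2.2 = pi.2 ∧ s.2.1 < pi.1 then (i, pi.1, s.2.2)
  else s

def get_right_most_lowest_point (points : List (Int × Int)) : Int × Int :=
  let p0 := PySem.List.pyGetD points 0 (0, 0)
  let st := (PySem.List.pyRange 1 (points.length : Int) 1).foldl (pvAStep points) (0, p0.1, p0.2)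
  PySem.List.pyGetD points st.1 (0, 0)

-- ===== PORT B =====
def get_right_most_lowest_point_alt (points : List (Int × Int)) : Int × Int :=
  let lowest_y := (PySem.List.min? (points.map (·.2)) (fun y => y)).getD 0
  (PySem.List.max? (points.filter (fun p => p.2 == lowest_y)) (·.1)).getD (0, 0)

-- ===== PRECONDITION & SPEC =====
-- A indexes points[0] and so raises IndexError on the empty list (B raises ValueError there).
def Pre_get_right_most_lowest_point (points : List (Int × Int)) : Prop := points ≠ []
instance (points : List (Int × Int)) : Decidable (Pre_get_right_most_lowest_point points) := by unfold Pre_get_right_most_lowest_point; infer_instance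
def pvWitness_get_right_most_lowest_point : (List (Int × Int)) := [(1, 2), (3, 2)]

def Spec_get_right_most_lowest_point (points : List (Int × Int)) (out : Int × Int) : Prop := out = get_right_most_lowest_point_alt points
instance (points : List (Int × Int)) (out : Int × Int) : Decidable (Spec_get_right_most_lowest_point points out) := by unfold Spec_get_right_most_lowest_point; infer_instance

-- ===== CLAIM (what is proved, stated in full; the proofs are below) =====
def Claim_equal_get_right_most_lowest_point : Prop := ∀ (points : List (Int × Int)), Dom_get_right_most_lowest_point points → Pre_get_right_most_lowest_point points → Spec_get_right_most_lowest_point points (get_right_most_lowest_point points)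

-- ===== LEMMAS AND PROOFS =====

-- the index-free content of A's loop body: keep the better of best and p
def pvStep (b p : Int × Int) : Int × Int :=
  if b.2 > p.2 then p
  else if b.2 = p.2 ∧ b.1 < p.1 then (p.1, b.2)
  else b

-- the body of PySem.List.max? once the accumulator is some _
def pvMaxStep (b p : Int × Int) : Int × Int := if b.1 < p.1 then p else b

theorem pvMax?_cons (a : Int × Int) (l : List (Int × Int)) :
    PySem.List.max? (a :: l) (·.1) = some (l.foldl pvMaxStep a) := by
  show List.foldl _ (some a) l = _
  induction l generalizing a with
  | nil => rfl
  | cons p t ih =>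
      simp only [List.foldl_cons, pvMaxStep]
      rw [show (if a.1 < p.1 then some p else some a) =
            some (if a.1 < p.1 then p else a) from by split <;> rfl, ih]

theorem pvStep_snd (b p : Int × Int) : (pvStep b p).2 = min b.2 p.2 := by
  unfold pvStep; split_ifs with h1 h2 <;> simp <;> omega

-- A's fold over indices computes pvStep over the corresponding suffix of points,
-- and the stored index always points at the stored coordinates.
theorem pvA_loop (points : List (Int × Int)) :
    ∀ (u : List (Int × Int)) (k : Nat) (s : Int × Int × Int),
      points.drop k = u →
      PySem.List.pyGetD points s.1 (0, 0) = (s.2.1, s.2.2) →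
      let st := (PySem.List.pyRange (k : Int) (points.length : Int) 1).foldl (pvAStep points) s
      PySem.List.pyGetD points st.1 (0, 0) = (st.2.1, st.2.2) ∧
        (st.2.1, st.2.2) = u.foldl pvStep (s.2.1, s.2.2) := by
  intro u
  induction u with
  | nil =>
      intro k s hdrop hs
      have hk : points.length ≤ k := by
        by_contra h
        have := List.drop_eq_nil_iff.mp hdrop
        omega
      rw [PySem.List.pyRange_one_eq_nil (by exact_mod_cast hk)]
      exact ⟨hs, hs.symm ▸ rfl⟩
  | cons p u' ih =>
      intro k s hdrop hs
      have hk : k < points.length := by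
        by_contra h
        rw [List.drop_eq_nil_of_le (by omega)] at hdrop
        simp at hdrop
      have hpk : points[k] = p := by
        have := List.drop_eq_getElem_cons hk
        rw [hdrop] at this
        exact (List.cons.injEq _ _ _ _ ▸ this).1.symm
      have hget : PySem.List.pyGetD points (k : Int) (0, 0) = p := by
        rw [PySem.List.pyGetD_natCast, List.getD_eq_getElem _ _ hk, hpk]
      have hdrop' : points.drop (k + 1) = u' := by
        have := List.drop_eq_getElem_cons hk
        rw [hdrop, hpk] at this
        exact (List.cons.injEq _ _ _ _ ▸ this).2.symm
      have hA : pvAStep points s (k : Int) =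
          if s.2.2 > p.2 then ((k : Int), p.1, p.2)
          else if s.2.2 = p.2 ∧ s.2.1 < p.1 then ((k : Int), p.1, s.2.2) else s := by
        simp only [pvAStep, hget]
      have hinv : PySem.List.pyGetD points (pvAStep points s (k : Int)).1 (0, 0) =
          ((pvAStep points s (k : Int)).2.1, (pvAStep points s (k : Int)).2.2) := by
        rw [hA]
        split_ifs with h1 h2
        · simpa using hget
        · simp only
          rw [hget]
          exact Prod.ext rfl h2.1.symm
        · exact hs
      have hstep : ((pvAStep points s (k : Int)).2.1, (pvAStep points s (k : Int)).2.2) =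
          pvStep (s.2.1, s.2.2) p := by
        rw [hA]
        simp only [pvStep]
        split_ifs <;> rfl
      rw [PySem.List.pyRange_one_cons (by exact_mod_cast hk), List.foldl_cons,
          show ((k : Int) + 1) = ((k + 1 : Nat) : Int) from by push_cast; ring]
      have := ih (k + 1) (pvAStep points s (k : Int)) hdrop' hinv
      refine ⟨this.1, ?_⟩
      rw [this.2, List.foldl_cons, hstep]

-- A on a nonempty list is the structural fold of pvStep
theorem pvA_eq_fold (h : Int × Int) (t : List (Int × Int)) :
    get_right_most_lowest_point (h :: t) = t.foldl pvStep h := by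
  have h0 : PySem.List.pyGetD (h :: t) 0 (0, 0) = h := by
    simp [PySem.List.pyGetD, PySem.List.pyGet?, PySem.List.pyIdx?]
  have hloop := pvA_loop (h :: t) t 1 (0, h.1, h.2) rfl (by simp [h0])
  simp only at hloop
  rw [show ((1 : Nat) : Int) = (1 : Int) from rfl] at hloop
  unfold get_right_most_lowest_point
  simp only [h0]
  rw [hloop.1, hloop.2]

-- merging the head pair with pvStep does not change B's selection
theorem pvMain (t : List (Int × Int)) : ∀ (h : Int × Int),
    some (t.foldl pvStep h) =
      PySem.List.max? ((h :: t).filter (fun p => p.2 == (t.map (·.2)).foldl min h.2)) (·.1) := by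
  induction t with
  | nil =>
      intro h
      simp [PySem.List.max?, List.filter]
  | cons p t' ih =>
      intro h
      have hsnd : (pvStep h p).2 = min h.2 p.2 := pvStep_snd h p
      have hM : ((p :: t').map (·.2)).foldl min h.2 = (t'.map (·.2)).foldl min (pvStep h p).2 := by
        rw [hsnd]; rfl
      have hle := (PySem.List.foldl_min_le (t'.map (·.2)) (min h.2 p.2)).1
      set M := (t'.map (·.2)).foldl min (min h.2 p.2) with hMdef
      have hle' : M ≤ min h.2 p.2 := hle
      rw [List.foldl_cons, ih (pvStep h p), hM, hsnd, ← hMdef]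
      -- now compare the two filtered lists
      by_cases hh : h.2 = M <;> by_cases hp : p.2 = M
      · -- both heads attain the minimum: pvStep h p = pvMaxStep h p
        have hstep : pvStep h p = pvMaxStep h p := by
          unfold pvStep pvMaxStep
          have : ¬ h.2 > p.2 := by omega
          rw [if_neg this]
          split_ifs with h2 h3 <;> first | (exact Prod.ext rfl (by omega)) | rfl | omega
        have hs2 : (pvStep h p).2 = M := by rw [hsnd]; omega
        simp only [List.filter_cons, hs2, hh, hp, beq_self_eq_true, if_pos]
        rw [pvMax?_cons, pvMax?_cons, List.foldl_cons, hstep]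
      · -- only h attains it: pvStep h p = h
        have hstep : pvStep h p = h := by
          unfold pvStep
          have h1 : ¬ h.2 > p.2 := by omega
          have h2 : ¬ (h.2 = p.2 ∧ h.1 < p.1) := by omega
          rw [if_neg h1, if_neg h2]
        rw [hstep]
        simp [hh, hp]
      · -- only p attains it: pvStep h p = p
        have hstep : pvStep h p = p := by
          unfold pvStep
          have h1 : h.2 > p.2 := by omega
          rw [if_pos h1]
        have hs2 : (pvStep h p).2 = M := by rw [hsnd]; omega
        simp [hstep, hh, hp]
      · -- neither head attains it
        have hs2 : (pvStep h p).2 ≠ M := by rw [hsnd]; omega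
        simp only [List.filter_cons, beq_iff_eq, if_neg hs2, if_neg hh, if_neg hp]

-- B on a nonempty list is the same structural fold
theorem pvB_eq_fold (h : Int × Int) (t : List (Int × Int)) :
    get_right_most_lowest_point_alt (h :: t) = t.foldl pvStep h := by
  unfold get_right_most_lowest_point_alt
  rw [List.map_cons, PySem.List.min?_id_cons]
  simp only [Option.getD_some]
  rw [← pvMain t h]
  rfl

-- ===== VERDICT (by name: the statement is the Claim_ definition above) =====
theorem get_right_most_lowest_point_spec : Claim_equal_get_right_most_lowest_point := by
  intro points _ hpre
  unfold Spec_get_right_most_lowest_point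
  cases points with
  | nil => exact absurd rfl hpre
  | cons h t => rw [pvA_eq_fold, pvB_eq_fold]
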